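-- pv_equiv track=rewrite | github.com/He-Liu-ooo/Analytical-Model-for-GPT-Mapping | auto-regression-with-prompt.py | calculate_weights_col_assignment
-- ===== SOURCE A (Python) =====
-- def calculate_weights_col_assignment(seg_num, weights_maclane_col_per_segment, mac_lane, weight_cols_total):
--     weights_col_per_segment_list = [0] * seg_num
--     weights_col_per_segment_max = 0
--
--     for i in range(seg_num):
--         if ((i + 1) * weights_maclane_col_per_segment * mac_lane + (seg_num - i - 1) * (weights_maclane_col_per_segment - 1) * mac_lane) >= weight_cols_total:
--             for ii in range(i + 1):
--                 weights_col_per_segment_list[ii] = weights_maclane_col_per_segment * mac_lane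
--                 weights_col_per_segment_max = weights_maclane_col_per_segment * mac_lane
--             for ii in range(i + 1, seg_num):
--                 weights_col_per_segment_list[ii] = (weights_maclane_col_per_segment - 1) * mac_lane
--             break
--     return (weights_col_per_segment_list, weights_col_per_segment_max)
-- ===== SOURCE B (Python) =====
-- def calculate_weights_col_assignment(seg_num, weights_maclane_col_per_segment, mac_lane, weight_cols_total):
--     # Closed-form: the loop's test value is linear in i, so solve for the
--     # smallest satisfying index directly and build the list with replication.
--     a = weights_maclane_col_per_segment * mac_lane
--     b = (weights_maclane_col_per_segment - 1) * mac_lane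
--     c = weight_cols_total - a - (seg_num - 1) * b
--     if c <= 0:
--         i = 0
--     elif mac_lane > 0:
--         i = -((-c) // mac_lane)  # ceil(c / mac_lane)
--     else:
--         i = None
--     if i is not None and i < seg_num:
--         return ([a] * (i + 1) + [b] * (seg_num - i - 1), a)
--     return ([0] * max(seg_num, 0), 0)
-- ===== Notes on version B (the rewrite author's own statement) =====
-- stated objective: simpler
-- what changed: A's linear scan for the first index passing the threshold test, with two inner fill loops mutating a preallocated list, is replaced by a closed-form solution of the linear test (ceiling division) and direct construction of the result by list replication.
import Mathlib
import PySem

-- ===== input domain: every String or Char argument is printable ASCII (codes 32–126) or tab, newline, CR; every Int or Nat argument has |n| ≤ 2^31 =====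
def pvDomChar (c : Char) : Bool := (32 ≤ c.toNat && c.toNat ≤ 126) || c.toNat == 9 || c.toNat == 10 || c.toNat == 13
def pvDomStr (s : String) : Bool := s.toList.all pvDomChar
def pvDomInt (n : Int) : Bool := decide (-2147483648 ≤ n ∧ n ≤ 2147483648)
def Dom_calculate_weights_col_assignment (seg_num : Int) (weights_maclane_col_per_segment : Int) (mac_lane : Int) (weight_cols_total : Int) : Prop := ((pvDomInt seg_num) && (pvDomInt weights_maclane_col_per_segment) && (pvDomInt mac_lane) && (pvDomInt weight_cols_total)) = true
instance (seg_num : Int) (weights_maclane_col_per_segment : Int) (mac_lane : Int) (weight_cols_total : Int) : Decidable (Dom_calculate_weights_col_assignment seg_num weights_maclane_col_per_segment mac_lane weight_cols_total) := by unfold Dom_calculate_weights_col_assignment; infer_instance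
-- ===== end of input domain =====

-- B replaces A's scan-and-fill loops with a closed-form first index plus list replication (objective: simpler).

-- ===== PORT A =====
-- the 'for i in range(seg_num): if …: fill; break' loop, step for step
def pvLoopA (seg_num w m total : Int) : List Int → List Int × Int → List Int × Int
  | [], st => st
  | i :: rest, st =>
    if (i + 1) * w * m + (seg_num - i - 1) * (w - 1) * m ≥ total then
      -- for ii in range(i+1): lst[ii] = w*m; mx = w*m
      let st1 := (PySem.List.pyRange 0 (i + 1) 1).foldl
        (fun st ii => (PySem.List.pySetD st.1 ii (w * m), w * m)) st
      -- for ii in range(i+1, seg_num): lst[ii] = (w-1)*m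
      let lst2 := (PySem.List.pyRange (i + 1) seg_num 1).foldl
        (fun l ii => PySem.List.pySetD l ii ((w - 1) * m)) st1.1
      (lst2, st1.2)   -- break
    else pvLoopA seg_num w m total rest st

def calculate_weights_col_assignment (seg_num : Int) (weights_maclane_col_per_segment : Int) (mac_lane : Int) (weight_cols_total : Int) : List Int × Int :=
  pvLoopA seg_num weights_maclane_col_per_segment mac_lane weight_cols_total
    (PySem.List.pyRange 0 seg_num 1) (List.replicate seg_num.toNat 0, 0)

-- ===== PORT B =====
def calculate_weights_col_assignment_alt (seg_num : Int) (weights_maclane_col_per_segment : Int) (mac_lane : Int) (weight_cols_total : Int) : List Int × Int :=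
  let a := weights_maclane_col_per_segment * mac_lane
  let b := (weights_maclane_col_per_segment - 1) * mac_lane
  let c := weight_cols_total - a - (seg_num - 1) * b
  let i? : Option Int :=
    if c ≤ 0 then some 0
    else if mac_lane > 0 then some (-(PySem.Int.floordiv (-c) mac_lane))
    else none
  match i? with
  | some i =>
    if i < seg_num then
      (List.replicate (i + 1).toNat a ++ List.replicate (seg_num - i - 1).toNat b, a)
    else (List.replicate (max seg_num 0).toNat 0, 0)
  | none => (List.replicate (max seg_num 0).toNat 0, 0)

-- ===== PRECONDITION & SPEC =====
def Spec_calculate_weights_col_assignment (seg_num : Int) (weights_maclane_col_per_segment : Int) (mac_lane : Int) (weight_cols_total : Int) (out : List Int × Int) : Prop := out = calculate_weights_col_assignment_alt seg_num weights_maclane_col_per_segment mac_lane weight_cols_total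
instance (seg_num : Int) (weights_maclane_col_per_segment : Int) (mac_lane : Int) (weight_cols_total : Int) (out : List Int × Int) : Decidable (Spec_calculate_weights_col_assignment seg_num weights_maclane_col_per_segment mac_lane weight_cols_total out) := by unfold Spec_calculate_weights_col_assignment; infer_instance

-- ===== CLAIM (what is proved, stated in full; the proofs are below) =====
def Claim_equal_calculate_weights_col_assignment : Prop := ∀ (seg_num : Int) (weights_maclane_col_per_segment : Int) (mac_lane : Int) (weight_cols_total : Int), Dom_calculate_weights_col_assignment seg_num weights_maclane_col_per_segment mac_lane weight_cols_total → Spec_calculate_weights_col_assignment seg_num weights_maclane_col_per_segment mac_lane weight_cols_total (calculate_weights_col_assignment seg_num weights_maclane_col_per_segment mac_lane weight_cols_total)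

-- ===== LEMMAS AND PROOFS =====

-- setting consecutive indices j..q-1 to v, as done by A's inner fill loops
theorem foldl_pySetD_range (v : Int) : ∀ (n : Nat) (j q : Int) (lst : List Int), 0 ≤ j → j ≤ q → q ≤ (lst.length : Int) → (q - j).toNat = n →
    (PySem.List.pyRange j q 1).foldl (fun l ii => PySem.List.pySetD l ii v) lst
      = lst.take j.toNat ++ List.replicate (q - j).toNat v ++ lst.drop q.toNat := by
  intro n
  induction n with
  | zero =>
    intro j q lst h0 hjq hlen hn
    have hq : q = j := by omega
    subst hq
    rw [PySem.List.pyRange_one_eq_nil le_rfl]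
    simp [List.take_append_drop]
  | succ n ih =>
    intro j q lst h0 hjq hlen hn
    have hlt : j < q := by omega
    obtain ⟨q', rfl⟩ : ∃ q', q = q' + 1 := ⟨q - 1, by omega⟩
    rw [PySem.List.pyRange_one_succ_right (by omega), List.foldl_append,
        ih j q' lst h0 (by omega) (by omega) (by omega)]
    simp only [List.foldl_cons, List.foldl_nil]
    rw [PySem.List.pySetD_of_nonneg _ _ (by omega)]
    have hjn : (j.toNat : Int) = j := Int.toNat_of_nonneg h0
    have hqn : q'.toNat < lst.length := by omega
    have hjlen : j.toNat ≤ lst.length := by omega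
    have hplen : (List.take j.toNat lst ++ List.replicate (q' - j).toNat v).length
        = j.toNat + (q' - j).toNat := by simp [hjlen]
    rw [List.set_append, if_neg (by rw [hplen]; omega), hplen]
    have hidx : q'.toNat - (j.toNat + (q' - j).toNat) = 0 := by omega
    rw [hidx, List.drop_eq_getElem_cons hqn]
    have hq1 : q'.toNat + 1 = (q' + 1).toNat := by omega
    have hrq : (q' + 1 - j).toNat = (q' - j).toNat + 1 := by omega
    rw [hrq, List.replicate_succ']
    simp [hq1]

-- the pair fold of A's first fill loop (list update together with the max variable)
theorem pair_fold (v : Int) : ∀ (l : List Int) (st : List Int × Int),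
    (l.foldl (fun st ii => (PySem.List.pySetD st.1 ii v, v)) st)
      = (l.foldl (fun ls ii => PySem.List.pySetD ls ii v) st.1,
         if l = [] then st.2 else v) := by
  intro l
  induction l with
  | nil => intro st; simp
  | cons x xs ih => intro st; simp [List.foldl, ih]

-- A's loop returns the initial state when no index in [j, seg_num) passes the test
theorem loopA_none (seg_num w m total : Int) : ∀ (n : Nat) (j : Int) (st : List Int × Int),
    (seg_num - j).toNat = n →
    (∀ k, j ≤ k → k < seg_num → ¬ ((k + 1) * w * m + (seg_num - k - 1) * (w - 1) * m ≥ total)) →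
    pvLoopA seg_num w m total (PySem.List.pyRange j seg_num 1) st = st := by
  intro n
  induction n with
  | zero =>
    intro j st hn _
    rw [PySem.List.pyRange_one_eq_nil (by omega)]
    rfl
  | succ n ih =>
    intro j st hn hno
    rw [PySem.List.pyRange_one_cons (by omega)]
    rw [pvLoopA, if_neg (hno j le_rfl (by omega))]
    exact ih (j + 1) st (by omega) (fun k hk1 hk2 => hno k (by omega) hk2)

-- A's loop skips the non-passing prefix [j, i)
theorem loopA_found (seg_num w m total : Int) (i : Int) :
    ∀ (n : Nat) (j : Int) (st : List Int × Int), j ≤ i → i < seg_num → (i - j).toNat = n →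
    (∀ k, j ≤ k → k < i → ¬ ((k + 1) * w * m + (seg_num - k - 1) * (w - 1) * m ≥ total)) →
    pvLoopA seg_num w m total (PySem.List.pyRange j seg_num 1) st =
      pvLoopA seg_num w m total (PySem.List.pyRange i seg_num 1) st := by
  intro n
  induction n with
  | zero =>
    intro j st hj hi hn _
    have : j = i := by omega
    subst this; rfl
  | succ n ih =>
    intro j st hj hi hn hno
    rw [PySem.List.pyRange_one_cons (show j < seg_num by omega)]
    rw [pvLoopA, if_neg (hno j le_rfl (by omega))]
    exact ih (j + 1) st (by omega) hi (by omega) (fun k hk1 hk2 => hno k (by omega) hk2)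

-- the result of A's break branch taken at index i
theorem fill_at (seg_num w m total : Int) (i : Int) (h0 : 0 ≤ i) (hi : i < seg_num)
    (hit : (i + 1) * w * m + (seg_num - i - 1) * (w - 1) * m ≥ total) :
    pvLoopA seg_num w m total (PySem.List.pyRange i seg_num 1) (List.replicate seg_num.toNat 0, 0)
      = (List.replicate (i + 1).toNat (w * m) ++ List.replicate (seg_num - i - 1).toNat ((w - 1) * m), w * m) := by
  rw [PySem.List.pyRange_one_cons hi, pvLoopA, if_pos hit]
  rw [pair_fold]
  have hne : PySem.List.pyRange 0 (i + 1) 1 ≠ [] := by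
    rw [PySem.List.pyRange_one_cons (by omega)]; simp
  rw [if_neg hne]
  rw [foldl_pySetD_range _ (i + 1 - 0).toNat 0 (i + 1) _ le_rfl (by omega) (by simp; omega) rfl]
  simp only [Int.toNat_zero, List.take_zero, List.nil_append, Int.sub_zero, List.drop_replicate]
  set L1 := List.replicate (i + 1).toNat (w * m) ++ List.replicate (seg_num.toNat - (i + 1).toNat) (0 : Int) with hL1
  have hL1len : (L1.length : Int) = seg_num := by simp [hL1]; omega
  rw [foldl_pySetD_range _ (seg_num - (i + 1)).toNat (i + 1) seg_num L1 (by omega) (by omega) (by omega) rfl]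
  have ht : L1.take (i + 1).toNat = List.replicate (i + 1).toNat (w * m) := List.take_left' (by simp)
  have hd : L1.drop seg_num.toNat = [] := List.drop_eq_nil_of_le (by omega)
  rw [ht, hd]
  have : (seg_num - (i + 1)).toNat = (seg_num - i - 1).toNat := by omega
  simp [this]

-- A's loop test is linear in the loop index
theorem test_iff (seg_num w m total i : Int) :
    ((i + 1) * w * m + (seg_num - i - 1) * (w - 1) * m ≥ total) ↔
      i * m ≥ total - w * m - (seg_num - 1) * ((w - 1) * m) := by
  have h : (i + 1) * w * m + (seg_num - i - 1) * (w - 1) * m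
      = i * m + (w * m + (seg_num - 1) * ((w - 1) * m)) := by ring
  rw [h]; constructor <;> intro <;> linarith

theorem AeqB (seg w m total : Int) :
    calculate_weights_col_assignment seg w m total = calculate_weights_col_assignment_alt seg w m total := by
  unfold calculate_weights_col_assignment calculate_weights_col_assignment_alt
  simp only []
  set c := total - w * m - (seg - 1) * ((w - 1) * m) with hc
  have hmax : (max seg 0).toNat = seg.toNat := by omega
  by_cases hc0 : c ≤ 0
  · rw [if_pos hc0]
    simp only []
    by_cases hseg : (0:Int) < seg
    · have htest0 : ((0:Int) + 1) * w * m + (seg - 0 - 1) * (w - 1) * m ≥ total := by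
        rw [test_iff]
        have : (0:Int) * m = 0 := by ring
        rw [← hc, this]; omega
      rw [loopA_found seg w m total 0 0 0 _ le_rfl hseg (by omega) (by intro k hk1 hk2; omega),
          fill_at seg w m total 0 le_rfl hseg htest0, if_pos hseg]
    · rw [PySem.List.pyRange_one_eq_nil (by omega), if_neg hseg]
      simp [pvLoopA, hmax]
  · rw [if_neg hc0]
    by_cases hm : m > 0
    · rw [if_pos hm]
      simp only []
      set i := -(PySem.Int.floordiv (-c) m) with hi
      have hfd : PySem.Int.floordiv (-c) m = (-c) / m := by
        unfold PySem.Int.floordiv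
        rw [Int.fdiv_eq_ediv]
        simp [Or.inl hm.le]
      have key : ∀ k : Int, (i ≤ k ↔ k * m ≥ c) := by
        intro k
        rw [hi, hfd]
        have h1 : -(-c / m) ≤ k ↔ -k ≤ -c / m := by omega
        rw [h1, Int.le_ediv_iff_mul_le hm]
        have h2 : -k * m = -(k * m) := by ring
        rw [h2]
        omega
      have h1 : 1 ≤ i := by
        by_contra h
        have : i ≤ 0 := by omega
        have := (key 0).mp this
        simp at this
        omega
      by_cases his : i < seg
      · rw [loopA_found seg w m total i (i - 0).toNat 0 _ (by omega) his rfl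
            (by intro k hk1 hk2
                rw [test_iff, ← hc]
                have : ¬ i ≤ k := by omega
                exact fun hge => this ((key k).mpr hge)),
            fill_at seg w m total i (by omega) his
              (by rw [test_iff, ← hc]; exact (key i).mp le_rfl),
            if_pos his]
      · rw [if_neg his,
            loopA_none seg w m total (seg - 0).toNat 0 _ rfl
            (by intro k hk1 hk2
                rw [test_iff, ← hc]
                have : ¬ i ≤ k := by omega
                exact fun hge => this ((key k).mpr hge)),
            hmax]
    · rw [if_neg hm]
      rw [loopA_none seg w m total (seg - 0).toNat 0 _ rfl
          (by intro k hk1 hk2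
              rw [test_iff, ← hc]
              intro hge
              nlinarith),
          hmax]

-- ===== VERDICT (by name: the statement is the Claim_ definition above) =====
theorem calculate_weights_col_assignment_spec : Claim_equal_calculate_weights_col_assignment := by
  intro seg w m total _
  exact AeqB seg w m total
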